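-- pv_equiv track=rewrite | github.com/FLOCK4H/Ruckus | Ruckus.py | replace_indentations
-- ===== SOURCE A (Python) =====
-- def replace_indentations(text):
--     lines = text.split('\n')
--     replaced_lines = []
--     for line in lines:
--         indentation_level = len(line) - len(line.lstrip(' '))
--         num_indentations = indentation_level // 4
--         replaced_line = ('&nbsp;' * 4 * num_indentations) + line.lstrip(' ')
--         replaced_lines.append(replaced_line)
--     return '\n'.join(replaced_lines)
-- ===== SOURCE B (Python) =====
-- def replace_indentations(text):
--     # One left-to-right pass with str.find: no line list is built;
--     # at each line start count leading spaces and emit the nbsp run.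
--     out = []
--     i = 0
--     n = len(text)
--     while i < n:
--         j = i
--         while j < n and text[j] == ' ':
--             j += 1
--         out.append('&nbsp;' * 4 * ((j - i) // 4))
--         k = text.find('\n', j)
--         if k == -1:
--             out.append(text[j:])
--             break
--         out.append(text[j:k + 1])
--         i = k + 1
--     return ''.join(out)
-- ===== Notes on version B (the rewrite author's own statement) =====
-- stated objective: alternative
-- what changed: Replaces the split('\n') / per-line list / join pipeline with a single left-to-right scan that uses str.find to locate each newline and emits the nbsp run and line tail directly, building no list of lines.
import Mathlib
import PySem

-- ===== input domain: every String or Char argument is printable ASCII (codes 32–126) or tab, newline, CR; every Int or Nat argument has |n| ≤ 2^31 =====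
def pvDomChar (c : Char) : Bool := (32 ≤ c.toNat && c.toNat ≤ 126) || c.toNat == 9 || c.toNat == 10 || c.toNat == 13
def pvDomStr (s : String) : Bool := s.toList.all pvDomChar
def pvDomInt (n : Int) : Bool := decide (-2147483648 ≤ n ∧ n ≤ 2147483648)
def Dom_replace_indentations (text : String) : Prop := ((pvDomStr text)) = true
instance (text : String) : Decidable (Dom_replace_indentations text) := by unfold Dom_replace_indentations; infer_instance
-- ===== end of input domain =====

-- B: one left-to-right scan emitting the nbsp run and line tail per line, instead of A's split/map/join over a list of lines (alternative decomposition, same cost).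


-- '&nbsp;' repeated k times
def pvNbspRep (k : Nat) : List Char := (List.replicate k "&nbsp;".toList).flatten

-- ===== PORT A =====
-- per-line body of A's loop; line.lstrip(' ') is exactly dropWhile (· == ' ') (strip the given char)
def pvLineA (line : List Char) : List Char :=
  let stripped := line.dropWhile (· == ' ')
  let num := (line.length - stripped.length) / 4
  pvNbspRep (4 * num) ++ stripped

def replace_indentations (text : String) : String :=
  -- text.split('\n') with a one-char separator is exactly List.splitOn '\n'
  let lines := text.toList.splitOn '\n'
  -- the loop appending to replaced_lines
  let replaced := lines.foldl (fun acc line => acc ++ [pvLineA line]) []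
  -- '\n'.join(...)
  String.mk (PySem.Chars.join ['\n'] replaced)

-- ===== PORT B =====
-- B's while-loop: count the leading spaces, take the line up to the next '\n'
-- (text.find('\n', j)), emit nbsp run + line, and continue after the newline.
def pvScan (cs : List Char) : List Char :=
  let sp := cs.takeWhile (· == ' ')
  let rest := cs.drop sp.length
  let line := rest.takeWhile (· != '\n')
  let tl := rest.drop line.length
  pvNbspRep (4 * (sp.length / 4)) ++ line ++
    (if tl.isEmpty then [] else '\n' :: pvScan tl.tail)
termination_by cs.length
decreasing_by
  rename_i hne
  have h2 : 0 < tl.length := by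
    have : tl ≠ [] := by simpa [List.isEmpty_iff] using hne
    exact List.length_pos_iff.mpr this
  simp only [List.length_tail, tl, rest, List.length_drop] at h2 ⊢
  omega

def replace_indentations_alt (text : String) : String :=
  String.mk (pvScan text.toList)

-- ===== PRECONDITION & SPEC =====
def Spec_replace_indentations (text : String) (out : String) : Prop := out = replace_indentations_alt text
instance (text : String) (out : String) : Decidable (Spec_replace_indentations text out) := by unfold Spec_replace_indentations; infer_instance

-- ===== CLAIM (what is proved, stated in full; the proofs are below) =====
def Claim_equal_replace_indentations : Prop := ∀ (text : String), Dom_replace_indentations text → Spec_replace_indentations text (replace_indentations text)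

-- ===== LEMMAS AND PROOFS =====

lemma pv_foldl_map (ls : List (List Char)) (acc : List (List Char)) :
    ls.foldl (fun a l => a ++ [pvLineA l]) acc = acc ++ ls.map pvLineA := by
  induction ls generalizing acc with
  | nil => simp
  | cons x xs ih => simp [List.foldl, ih]

lemma pv_drop_length_takeWhile (p : Char → Bool) (cs : List Char) :
    cs.drop (cs.takeWhile p).length = cs.dropWhile p := by
  induction cs with
  | nil => rfl
  | cons c t ih =>
    by_cases h : p c
    · simp [h, ih]
    · simp [h]

lemma pv_tw_split (cs : List Char) :
    cs.takeWhile (· != '\n') =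
      cs.takeWhile (· == ' ') ++ (cs.dropWhile (· == ' ')).takeWhile (· != '\n') := by
  induction cs with
  | nil => rfl
  | cons c t ih =>
    by_cases h : c = ' '
    · subst h
      simp [ih]
    · simp [h]

lemma pv_dw_split (cs : List Char) :
    cs.dropWhile (· != '\n') = (cs.dropWhile (· == ' ')).dropWhile (· != '\n') := by
  induction cs with
  | nil => rfl
  | cons c t ih =>
    by_cases h : c = ' '
    · subst h
      simp [ih]
    · simp [List.dropWhile_cons, h]

lemma pv_dropWhile_takeWhile (p q : Char → Bool) (cs : List Char) :
    ((cs.dropWhile p).takeWhile q).dropWhile p = (cs.dropWhile p).takeWhile q := by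
  cases h : cs.dropWhile p with
  | nil => simp
  | cons c t =>
    have hne : cs.dropWhile p ≠ [] := by simp [h]
    have hc : p c = false := by
      have hh := List.head_dropWhile_not p hne
      rwa [show (cs.dropWhile p).head hne = c from by simp [h]] at hh
    by_cases hq : q c = true
    · simp [hq, hc]
    · simp [hq]

lemma pv_splitOn_newline (cs : List Char) :
    cs.splitOn '\n' = (cs.takeWhile (· != '\n')) ::
      (match cs.dropWhile (· != '\n') with
       | [] => []
       | _ :: t => t.splitOn '\n') := by
  induction cs with
  | nil => rfl
  | cons c t ih =>
    by_cases h : c = '\n'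
    · subst h
      simp [List.splitOn, List.splitOnP_cons]
    · simp only [List.splitOn] at ih ⊢
      rw [List.splitOnP_cons]
      simp only [beq_iff_eq, h, if_false]
      rw [ih]
      simp [h]

lemma pv_lineA_decomp (cs : List Char) :
    pvLineA (cs.takeWhile (· != '\n')) =
      pvNbspRep (4 * ((cs.takeWhile (· == ' ')).length / 4)) ++
        (cs.dropWhile (· == ' ')).takeWhile (· != '\n') := by
  unfold pvLineA
  rw [pv_tw_split cs]
  have hd : ((cs.takeWhile (· == ' ')) ++ (cs.dropWhile (· == ' ')).takeWhile (· != '\n')).dropWhile (· == ' ')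
      = (cs.dropWhile (· == ' ')).takeWhile (· != '\n') := by
    rw [List.dropWhile_append]
    have h1 : (cs.takeWhile (· == ' ')).dropWhile (· == ' ') = [] := by
      apply List.dropWhile_eq_nil_iff.mpr
      intro x hx
      exact List.mem_takeWhile_imp (p := (· == ' ')) hx
    simp [h1, pv_dropWhile_takeWhile]
  simp only [hd, List.length_append]
  have : (cs.takeWhile (· == ' ')).length + ((cs.dropWhile (· == ' ')).takeWhile (· != '\n')).length
      - ((cs.dropWhile (· == ' ')).takeWhile (· != '\n')).length = (cs.takeWhile (· == ' ')).length := by omega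
  rw [this]

lemma pvScan_unfold (cs : List Char) :
    pvScan cs = pvNbspRep (4 * ((cs.takeWhile (· == ' ')).length / 4)) ++
      (cs.dropWhile (· == ' ')).takeWhile (· != '\n') ++
      (if ((cs.dropWhile (· == ' ')).dropWhile (· != '\n')).isEmpty then []
       else '\n' :: pvScan ((cs.dropWhile (· == ' ')).dropWhile (· != '\n')).tail) := by
  rw [pvScan.eq_1]
  simp only [pv_drop_length_takeWhile]

lemma pv_scan_eq (n : Nat) : ∀ (cs : List Char), cs.length ≤ n →
    pvScan cs = PySem.Chars.join ['\n'] ((cs.splitOn '\n').map pvLineA) := by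
  induction n with
  | zero =>
    intro cs hcs
    have : cs = [] := List.length_eq_zero_iff.mp (Nat.le_zero.mp hcs)
    subst this
    rw [pvScan_unfold]
    simp [List.splitOn, List.splitOnP_nil, PySem.Chars.join_singleton, pvLineA, pvNbspRep]
  | succ n ih =>
    intro cs hcs
    rw [pvScan_unfold, pv_splitOn_newline cs, List.map_cons, pv_lineA_decomp, pv_dw_split cs]
    cases h : ((cs.dropWhile (· == ' ')).dropWhile (· != '\n')) with
    | nil =>
      simp only [List.isEmpty_nil, if_true, List.append_nil, List.map_nil,
        PySem.Chars.join_singleton]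
    | cons c t =>
      simp only [List.isEmpty_cons, List.tail_cons]
      have ht : t.length ≤ n := by
        have h1 : ((cs.dropWhile (· == ' ')).dropWhile (· != '\n')).length ≤ (cs.dropWhile (· == ' ')).length :=
          List.length_dropWhile_le _ _
        have h2 : (cs.dropWhile (· == ' ')).length ≤ cs.length := List.length_dropWhile_le _ _
        have h3 := congrArg List.length h
        simp only [List.length_cons] at h3
        omega
      rw [ih t ht]
      cases hsp : t.splitOn '\n' with
      | nil =>
        exfalso
        have := pv_splitOn_newline t
        rw [hsp] at this
        simp at this
      | cons m ms =>
        rw [List.map_cons, PySem.Chars.join_cons_cons]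
        simp

-- ===== VERDICT (by name: the statement is the Claim_ definition above) =====
theorem replace_indentations_spec : Claim_equal_replace_indentations := by
  intro text _
  unfold Spec_replace_indentations
  simp only [replace_indentations, replace_indentations_alt]
  rw [pv_foldl_map, List.nil_append, pv_scan_eq text.toList.length text.toList le_rfl]
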